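-- pv_equiv track=rewrite | github.com/PuidetA/dataAlgorithmsCourse | w2/bitpairs.py | pairs
-- ===== SOURCE A (Python) =====
-- def pairs(s):
--     if len(s) < 2:
--         return 0
--     indexLocations = [] # To make this O(n) we need to store the index locations to then calculate each index locations' contribution to the sum of distances, instead of doing 2 for loops and checking each pair separately.
--
--
--     for index in range(len(s)): # O(n), we check each element in the string, and pass the index of all the 1 elements to the indexLocations list.
--         if s[index] == "1":
--             indexLocations.append(index)
--     if len(indexLocations) < 2:
--         return 0
--
--     sumOfPairs = 0 # Initialize
--
--     for index in range(len(indexLocations)): # O(n)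
--         # We calculate the sum of pairs in one pass by checking the contribution of each 1 element in the string to the sum, since each 1 element contributes to the sum of pairs by the amount of 1 elements that are to the right of it.
--         # We do this by adding the distances of all the 1 elements to the right of the current 1 element, and subtract the distances of the 1 elements to the left.
--         sumOfPairs = sumOfPairs + index*indexLocations[index] - indexLocations[index]*(len(indexLocations)-1-index)
--
--
--     return sumOfPairs
-- ===== SOURCE B (Python) =====
-- def pairs(s):
--     acc = 0
--     count = 0      # how many '1's seen so far
--     sumIdx = 0     # sum of their indices
--     for i, c in enumerate(s):
--         if c == "1":
--             acc += count * i - sumIdx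
--             count += 1
--             sumIdx += i
--     return acc
-- ===== Notes on version B (the rewrite author's own statement) =====
-- stated objective: simpler
-- what changed: Replaced A's build-an-index-list pass plus a second indexed loop over that list with a single sweep over the string maintaining two running integers (count of '1's and sum of their indices), adding count*i - sumIdx at each '1'; no intermediate list and no guards are needed.
import Mathlib
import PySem

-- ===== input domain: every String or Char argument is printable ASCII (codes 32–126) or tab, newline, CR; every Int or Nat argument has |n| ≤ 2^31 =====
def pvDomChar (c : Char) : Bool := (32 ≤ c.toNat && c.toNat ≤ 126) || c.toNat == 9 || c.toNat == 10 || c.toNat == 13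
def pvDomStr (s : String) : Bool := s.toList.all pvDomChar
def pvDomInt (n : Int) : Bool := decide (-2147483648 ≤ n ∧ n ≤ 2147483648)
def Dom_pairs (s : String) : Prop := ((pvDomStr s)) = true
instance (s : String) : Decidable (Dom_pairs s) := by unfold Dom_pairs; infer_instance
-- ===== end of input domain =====

-- B replaces A's index-list build plus second indexed loop by one sweep keeping (count, sumIdx) running totals; simpler, O(1) extra space.
-- ===== PORT A =====
-- A builds the list of '1' positions, then sums index*loc - loc*(k-1-index) over it.
def pairs (s : String) : Int :=
  if PySem.Str.len s < 2 then 0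
  else
    let indexLocations : List Int :=
      (PySem.List.pyRange 0 (PySem.Str.len s) 1).foldl
        (fun acc index =>
          if PySem.Str.pyGet? s index = some '1' then acc ++ [index] else acc) []
    if (indexLocations.length : Int) < 2 then 0
    else
      (PySem.List.pyRange 0 (indexLocations.length : Int) 1).foldl
        (fun sumOfPairs index =>
          sumOfPairs + index * PySem.List.pyGetD indexLocations index 0
            - PySem.List.pyGetD indexLocations index 0
              * ((indexLocations.length : Int) - 1 - index)) 0

-- ===== PORT B =====
-- B: one sweep with running (acc, count, sumIdx); at each '1' at index i, acc += count*i - sumIdx.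
def pairs_alt (s : String) : Int :=
  ((PySem.List.enumerate s.toList 0).foldl
    (fun st p =>
      if p.2 = '1' then (st.1 + st.2.1 * p.1 - st.2.2, st.2.1 + 1, st.2.2 + p.1) else st)
    ((0 : Int), (0 : Int), (0 : Int))).1

-- ===== PRECONDITION & SPEC =====
def Spec_pairs (s : String) (out : Int) : Prop := out = pairs_alt s
instance (s : String) (out : Int) : Decidable (Spec_pairs s out) := by unfold Spec_pairs; infer_instance

-- ===== CLAIM =====
def Claim_equal_pairs : Prop := ∀ (s : String), Dom_pairs s → Spec_pairs s (pairs s)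

-- ===== LEMMAS AND PROOFS =====

-- B's fold step on the Int list of '1' positions
def bstep (st : Int × Int × Int) (x : Int) : Int × Int × Int :=
  (st.1 + st.2.1 * x - st.2.2, st.2.1 + 1, st.2.2 + x)

-- the '1' positions of s, as A and B both enumerate them
def onesOf (s : String) : List Int :=
  ((PySem.List.enumerate s.toList 0).filter (fun p => p.2 = '1')).map (·.1)

lemma bstate_snd (L : List Int) : ∀ (st : Int × Int × Int),
    (L.foldl bstep st).2 = (st.2.1 + L.length, st.2.2 + L.sum) := by
  induction L with
  | nil => intro st; simp
  | cons x l ih =>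
    intro st
    rw [List.foldl_cons, ih]
    simp only [bstep, List.length_cons, List.sum_cons, Prod.mk.injEq]
    constructor <;> push_cast <;> ring

lemma sum_getD_range (L : List Int) :
    (∑ j ∈ Finset.range L.length, L.getD j 0) = L.sum := by
  induction L using List.reverseRecOn with
  | nil => simp
  | append_singleton l x ih =>
    rw [List.length_append, List.length_singleton, Finset.sum_range_succ]
    have h1 : ∀ j ∈ Finset.range l.length, (l ++ [x]).getD j 0 = l.getD j 0 := by
      intro j hj
      simp at hj
      simp [List.getD, List.getElem?_append_left hj]
    rw [Finset.sum_congr rfl h1, ih]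
    simp [List.getD]

lemma main_sum (L : List Int) :
    (∑ j ∈ Finset.range L.length,
      ((j : Int) * L.getD j 0 - L.getD j 0 * ((L.length : Int) - 1 - (j : Int))))
    = (L.foldl bstep ((0 : Int), (0 : Int), (0 : Int))).1 := by
  induction L using List.reverseRecOn with
  | nil => simp
  | append_singleton l x ih =>
    have hsnd := bstate_snd l ((0 : Int), (0 : Int), (0 : Int))
    rw [List.foldl_append]
    have hk : (l ++ [x]).length = l.length + 1 := by simp
    rw [hk, Finset.sum_range_succ]
    have hx : (l ++ [x]).getD l.length 0 = x := by
      simp [List.getD]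
    have h1 : ∀ j ∈ Finset.range l.length,
        ((j : Int) * (l ++ [x]).getD j 0 - (l ++ [x]).getD j 0 * (((l.length + 1 : Nat) : Int) - 1 - (j : Int)))
        = ((j : Int) * l.getD j 0 - l.getD j 0 * ((l.length : Int) - 1 - (j : Int))) - l.getD j 0 := by
      intro j hj
      simp at hj
      have : (l ++ [x]).getD j 0 = l.getD j 0 := by
        simp [List.getD, List.getElem?_append_left hj]
      rw [this]
      push_cast
      ring
    rw [Finset.sum_congr rfl h1, Finset.sum_sub_distrib, sum_getD_range, ih, hx]
    simp only [List.foldl_cons, List.foldl_nil, bstep]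
    rw [hsnd]
    push_cast
    ring

lemma foldl_sub_sum (g h : Nat → Int) : ∀ (n : Nat) (acc : Int),
    (List.range n).foldl (fun a j => a + g j - h j) acc
      = acc + ∑ j ∈ Finset.range n, (g j - h j) := by
  intro n
  induction n with
  | zero => simp
  | succ m ih =>
    intro acc
    rw [List.range_succ, List.foldl_append, ih, Finset.sum_range_succ]
    simp [List.foldl_cons]
    ring

-- the conditional enumerate-fold of B is the unconditional fold over onesOf
lemma filter_fold (l : List (Int × Char)) : ∀ (st : Int × Int × Int),
    l.foldl (fun st p =>
        if p.2 = '1' then (st.1 + st.2.1 * p.1 - st.2.2, st.2.1 + 1, st.2.2 + p.1) else st) st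
    = ((l.filter (fun p => p.2 = '1')).map (·.1)).foldl bstep st := by
  induction l with
  | nil => intro st; simp
  | cons p l ih =>
    intro st
    by_cases hp : p.2 = '1' <;> simp [hp, ih, bstep]

-- A's first loop builds exactly onesOf s
lemma first_loop (s : String) :
    (PySem.List.pyRange 0 (PySem.Str.len s) 1).foldl
      (fun acc index =>
        if PySem.Str.pyGet? s index = some '1' then acc ++ [index] else acc) []
    = onesOf s := by
  unfold onesOf
  rw [PySem.Str.len_eq, PySem.List.pyRange_zero_natCast,
    PySem.List.enumerate_eq_map_pyRange s.toList ' ']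
  rw [show (fun (acc : List Int) (index : Int) =>
        if PySem.Str.pyGet? s index = some '1' then acc ++ [index] else acc)
      = (fun acc x =>
        if (fun index : Int => decide (PySem.Str.pyGet? s index = some '1')) x = true
        then acc ++ [id x] else acc) by funext acc x; simp]
  rw [PySem.List.foldl_append_if]
  have hlen : PySem.List.len s.toList = ((s.toList.length : Nat) : Int) := by
    simp [PySem.List.len]
  rw [hlen, PySem.List.pyRange_zero_natCast, List.filter_map, List.filter_map]
  simp only [List.nil_append, Function.comp_def]
  have hpred : ∀ k ∈ List.range s.toList.length,
      (decide (PySem.Str.pyGet? s ((k : Nat) : Int) = some '1'))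
      = (decide (PySem.List.pyGetD s.toList ((k : Nat) : Int) ' ' = '1')) := by
    intro k hk
    simp only [List.mem_range] at hk
    rw [PySem.Str.pyGet?_natCast, PySem.List.pyGetD_natCast]
    simp [List.getD, List.getElem?_eq_getElem hk]
  rw [List.filter_congr hpred, List.filter_map]
  simp [List.map_map, Function.comp_def]

lemma onesOf_len_le (s : String) : (onesOf s).length ≤ s.toList.length := by
  unfold onesOf
  rw [List.length_map]
  have := List.length_filter_le (fun p => decide (p.2 = '1')) (PySem.List.enumerate s.toList 0)
  simp only [PySem.List.length_enumerate] at this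
  exact this

lemma bfold_small (L : List Int) (h : L.length < 2) :
    (L.foldl bstep ((0 : Int), (0 : Int), (0 : Int))).1 = 0 := by
  match L, h with
  | [], _ => rfl
  | [x], _ => simp [bstep]

-- ===== VERDICT =====
theorem pairs_spec : Claim_equal_pairs := by
  intro s _
  unfold Spec_pairs pairs pairs_alt
  rw [filter_fold]
  show _ = (List.foldl bstep _ (onesOf s)).1
  rw [first_loop]
  by_cases h1 : PySem.Str.len s < 2
  · simp only [h1, if_true]
    have hlen : (onesOf s).length < 2 := by
      have hle := onesOf_len_le s
      have h2 : PySem.Str.len s = (s.toList.length : Int) := by simp [PySem.Str.len_eq]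
      omega
    exact (bfold_small _ hlen).symm
  · simp only [h1, if_false]
    by_cases h2 : ((onesOf s).length : Int) < 2
    · simp only [h2, if_true]
      exact (bfold_small _ (by exact_mod_cast h2)).symm
    · simp only [h2, if_false]
      rw [PySem.List.pyRange_zero_natCast, List.foldl_map]
      have := foldl_sub_sum
        (fun j => (j : Int) * PySem.List.pyGetD (onesOf s) (j : Int) 0)
        (fun j => PySem.List.pyGetD (onesOf s) (j : Int) 0 * (((onesOf s).length : Int) - 1 - (j : Int)))
        (onesOf s).length 0
      rw [this]
      simp only [PySem.List.pyGetD_natCast, zero_add]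
      exact main_sum (onesOf s)
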